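-- pv_equiv track=rewrite | github.com/mehCake/luraph-deobfuscator-py | src/passes/string_reconstruction.py | _choose_long_brackets
-- ===== SOURCE A (Python) =====
-- from typing import Dict, List, Tuple, TYPE_CHECKING
--
-- def _choose_long_brackets(text: str) -> Tuple[str, str] | None:
--     eq_count = 0
--     while eq_count < 10:
--         delim = "=" * eq_count
--         closing = f"]{delim}]"
--         if closing not in text:
--             opening = f"[{delim}["
--             return opening, closing
--         eq_count += 1
--     return None
-- ===== SOURCE B (Python) =====
-- def _choose_long_brackets(text):
--     present = set()
--     n = len(text)
--     for i in range(n):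
--         if text[i] == ']':
--             j = i + 1
--             while j < n and text[j] == '=':
--                 j += 1
--             if j < n and text[j] == ']':
--                 present.add(j - i - 1)
--     for k in range(10):
--         if k not in present:
--             d = "=" * k
--             return ("[" + d + "[", "]" + d + "]")
--     return None
-- ===== Notes on version B (the rewrite author's own statement) =====
-- stated objective: alternative
-- what changed: Instead of testing each of the ten closing long-bracket delimiters with a separate substring scan, B makes one left-to-right pass that collects the set of equals-sign run lengths enclosed between two closing square brackets, then returns the pair for the first level 0..9 absent from that set.
import Mathlib
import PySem

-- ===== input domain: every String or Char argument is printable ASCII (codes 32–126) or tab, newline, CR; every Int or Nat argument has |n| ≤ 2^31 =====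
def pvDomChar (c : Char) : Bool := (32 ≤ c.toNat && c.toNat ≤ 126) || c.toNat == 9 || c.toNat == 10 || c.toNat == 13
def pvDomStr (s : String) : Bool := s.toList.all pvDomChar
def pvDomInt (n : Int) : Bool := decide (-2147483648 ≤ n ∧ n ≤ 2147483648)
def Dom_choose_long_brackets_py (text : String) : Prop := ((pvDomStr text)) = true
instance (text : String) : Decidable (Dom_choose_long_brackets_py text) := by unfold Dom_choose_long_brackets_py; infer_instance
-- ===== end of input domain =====

-- B replaces A's ten substring scans by a single left-to-right scan that collects
-- the set of present long-bracket levels, then picks the first absent one (objective: alternative).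

-- ===== PORT A =====
-- the while loop of A, recursion on eq_count (counting up to 10)
def chooseLB_goA (text : List Char) (eq_count : Nat) : Option (String × String) :=
  if h : eq_count < 10 then
    let delim := List.replicate eq_count '='
    let closing := ']' :: (delim ++ [']'])
    if PySem.Chars.isIn closing text = false then
      some (String.ofList ('[' :: (delim ++ ['['])), String.ofList closing)
    else chooseLB_goA text (eq_count + 1)
  else none
termination_by 10 - eq_count

def choose_long_brackets_py (text : String) : Option (String × String) :=
  chooseLB_goA text.toList 0

-- ===== PORT B =====
-- the inner while loop of Source B: length of the leading run of '='
def chooseLB_eqRun : List Char → Nat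
  | [] => 0
  | c :: t => if c = '=' then chooseLB_eqRun t + 1 else 0

-- Source B's for-loop over the positions of text, accumulating the set `present`
def chooseLB_scan : List Char → PySem.Set Int → PySem.Set Int
  | [], s => s
  | c :: rest, s =>
      chooseLB_scan rest
        (if c = ']' then
          (let m := chooseLB_eqRun rest
           if (rest.drop m).head? = some ']' then PySem.Set.add s (m : Int) else s)
         else s)

-- Source B's final loop: first k in range(10) not in present
def chooseLB_goB (present : PySem.Set Int) (k : Nat) : Option (String × String) :=
  if h : k < 10 then
    if PySem.Set.contains present (k : Int) = false then
      let d := List.replicate k '='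
      some (String.ofList ('[' :: (d ++ ['['])), String.ofList (']' :: (d ++ [']'])))
    else chooseLB_goB present (k + 1)
  else none
termination_by 10 - k

def choose_long_brackets_py_alt (text : String) : Option (String × String) :=
  chooseLB_goB (chooseLB_scan text.toList PySem.Set.empty) 0

-- ===== PRECONDITION & SPEC =====
def Spec_choose_long_brackets_py (text : String) (out : Option (String × String)) : Prop := out = choose_long_brackets_py_alt text
instance (text : String) (out : Option (String × String)) : Decidable (Spec_choose_long_brackets_py text out) := by unfold Spec_choose_long_brackets_py; infer_instance

-- ===== CLAIM (what is proved, stated in full; the proofs are below) =====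
def Claim_equal_choose_long_brackets_py : Prop := ∀ (text : String), Dom_choose_long_brackets_py text → Spec_choose_long_brackets_py text (choose_long_brackets_py text)

-- ===== LEMMAS AND PROOFS =====

-- `rest` starts with k '='s followed by ']' iff eqRun rest = k and position k of rest is ']'
theorem chooseLB_eqRun_spec (rest : List Char) (k : Nat) :
    (∃ t, rest = List.replicate k '=' ++ ']' :: t) ↔
      (chooseLB_eqRun rest = k ∧ (rest.drop k).head? = some ']') := by
  induction rest generalizing k with
  | nil => simp [chooseLB_eqRun]
  | cons c r ih =>
    cases k with
    | zero =>
      constructor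
      · rintro ⟨t, h⟩
        simp at h
        simp [h.1, chooseLB_eqRun]
      · rintro ⟨h1, h2⟩
        simp at h2
        exact ⟨r, by simp [h2]⟩
    | succ k =>
      constructor
      · rintro ⟨t, h⟩
        rw [List.replicate_succ] at h
        simp at h
        obtain ⟨hc, hr⟩ := h
        have := (ih k).mp ⟨t, hr⟩
        rw [List.drop_succ_cons]
        simp [chooseLB_eqRun, hc, this.1, this.2]
      · rintro ⟨h1, h2⟩
        rw [List.drop_succ_cons] at h2
        by_cases hc : c = '='
        · simp [chooseLB_eqRun, hc] at h1
          obtain ⟨t, ht⟩ := (ih k).mpr ⟨h1, h2⟩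
          refine ⟨t, ?_⟩
          rw [List.replicate_succ]
          simp [hc, ht]
        · simp [chooseLB_eqRun, hc] at h1

-- at a given position, the level-k closer is a prefix iff c = ']' and the '=' run matches
theorem chooseLB_prefix_iff (c : Char) (rest : List Char) (k : Nat) :
    (']' :: (List.replicate k '=' ++ [']'])) <+: (c :: rest) ↔
      (c = ']' ∧ chooseLB_eqRun rest = k ∧ (rest.drop k).head? = some ']') := by
  rw [List.cons_prefix_cons]
  constructor
  · rintro ⟨hc, hp⟩
    obtain ⟨t, ht⟩ := hp
    simp only [List.append_assoc, List.singleton_append] at ht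
    exact ⟨hc.symm, (chooseLB_eqRun_spec rest k).mp ⟨t, ht.symm⟩⟩
  · rintro ⟨hc, h2⟩
    obtain ⟨t, ht⟩ := (chooseLB_eqRun_spec rest k).mpr h2
    exact ⟨hc.symm, ⟨t, by simp [ht]⟩⟩

-- membership in the scanned set characterises substring presence of the level-k closer
theorem chooseLB_mem_scan (l : List Char) (s : PySem.Set Int) (k : Nat) :
    ((k : Int) ∈ chooseLB_scan l s) ↔
      ((k : Int) ∈ s ∨ (']' :: (List.replicate k '=' ++ [']'])) <:+: l) := by
  induction l generalizing s with
  | nil => simp [chooseLB_scan]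
  | cons c rest ih =>
    rw [chooseLB_scan, ih, List.infix_cons_iff, chooseLB_prefix_iff]
    by_cases hc : c = ']'
    · rw [if_pos hc]
      by_cases hcond : (rest.drop (chooseLB_eqRun rest)).head? = some ']'
      · rw [if_pos hcond, PySem.Set.mem_add]
        constructor
        · rintro ((h | h) | h)
          · exact Or.inl h
          · have hk : k = chooseLB_eqRun rest := by exact_mod_cast h
            exact Or.inr (Or.inl ⟨hc, hk.symm, by rw [hk]; exact hcond⟩)
          · exact Or.inr (Or.inr h)
        · rintro (h | ⟨_, hk, _⟩ | h)
          · exact Or.inl (Or.inl h)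
          · exact Or.inl (Or.inr (by exact_mod_cast congrArg (Nat.cast : Nat → Int) hk.symm))
          · exact Or.inr h
      · rw [if_neg hcond]
        constructor
        · rintro (h | h)
          · exact Or.inl h
          · exact Or.inr (Or.inr h)
        · rintro (h | ⟨_, hk, hd⟩ | h)
          · exact Or.inl h
          · exact absurd (by rw [hk]; exact hd) hcond
          · exact Or.inr h
    · rw [if_neg hc]
      constructor
      · rintro (h | h)
        · exact Or.inl h
        · exact Or.inr (Or.inr h)
      · rintro (h | ⟨hc', _⟩ | h)
        · exact Or.inl h
        · exact absurd hc' hc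
        · exact Or.inr h

-- the two selection loops agree step by step
theorem chooseLB_go_eq (l : List Char) (j : Nat) :
    chooseLB_goA l j = chooseLB_goB (chooseLB_scan l PySem.Set.empty) j := by
  by_cases h : j < 10
  · rw [chooseLB_goA, chooseLB_goB, dif_pos h, dif_pos h]
    have hmem : ((j : Int) ∈ chooseLB_scan l PySem.Set.empty) ↔
        (']' :: (List.replicate j '=' ++ [']'])) <:+: l := by
      rw [chooseLB_mem_scan]
      simp [PySem.Set.empty]
    by_cases hin : (']' :: (List.replicate j '=' ++ [']'])) <:+: l
    · have h1 : PySem.Chars.isIn (']' :: (List.replicate j '=' ++ [']'])) l = true :=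
        (PySem.Chars.isIn_iff_infix _ _).mpr hin
      have h2 : PySem.Set.contains (chooseLB_scan l PySem.Set.empty) (j : Int) = true := by
        rw [PySem.Set.contains_iff]
        exact hmem.mpr hin
      rw [if_neg (fun hf => Bool.noConfusion (h1.symm.trans hf)),
        if_neg (fun hf => Bool.noConfusion (h2.symm.trans hf))]
      exact chooseLB_go_eq l (j + 1)
    · have h1 : PySem.Chars.isIn (']' :: (List.replicate j '=' ++ [']'])) l = false := by
        cases hv : PySem.Chars.isIn (']' :: (List.replicate j '=' ++ [']'])) l
        · rfl
        · exact absurd ((PySem.Chars.isIn_iff_infix _ _).mp hv) hin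
      have h2 : PySem.Set.contains (chooseLB_scan l PySem.Set.empty) (j : Int) = false := by
        cases hv : PySem.Set.contains (chooseLB_scan l PySem.Set.empty) (j : Int)
        · rfl
        · rw [PySem.Set.contains_iff] at hv
          exact absurd (hmem.mp hv) hin
      rw [if_pos h1, if_pos h2]
  · rw [chooseLB_goA, chooseLB_goB, dif_neg h, dif_neg h]
termination_by 10 - j

-- ===== VERDICT (by name: the statement is the Claim_ definition above) =====
theorem choose_long_brackets_py_spec : Claim_equal_choose_long_brackets_py := by
  intro text _
  unfold Spec_choose_long_brackets_py choose_long_brackets_py choose_long_brackets_py_alt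
  exact chooseLB_go_eq text.toList 0
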